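-- pv_equiv track=rewrite | github.com/leztien/math | Primfaktorenzerlegung.py | multiset_disjunction
-- ===== SOURCE A (Python) =====
-- from collections import Counter
--
-- def multiset_disjunction(list1, list2):
--     c = Counter()
--     c1 = Counter(list1)
--     c2 = Counter(list2)
--
--     keys = set(c1.keys()).union(c2.keys())
--
--     for k in keys:
--         c[k] = max(c1[k], c2[k])
--
--     return sum([[k]*c[k] for k in sorted(c.keys())], [])
-- ===== SOURCE B (Python) =====
-- def multiset_disjunction(list1, list2):
--     s1 = sorted(list1)
--     s2 = sorted(list2)
--     out = []
--     i = j = 0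
--     while i < len(s1) and j < len(s2):
--         v = s1[i] if s1[i] < s2[j] else s2[j]
--         r1 = 0
--         while i + r1 < len(s1) and s1[i + r1] == v:
--             r1 += 1
--         r2 = 0
--         while j + r2 < len(s2) and s2[j + r2] == v:
--             r2 += 1
--         out.extend([v] * max(r1, r2))
--         i += r1
--         j += r2
--     out.extend(s1[i:])
--     out.extend(s2[j:])
--     return out
-- ===== Notes on version B (the rewrite author's own statement) =====
-- stated objective: faster
-- what changed: Replaces the Counter/set-union/sorted-keys build plus the quadratic sum(list-of-lists, []) flatten with sorting both inputs and a two-pointer run-length merge that emits each value max(run1, run2) times directly.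
import Mathlib
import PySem

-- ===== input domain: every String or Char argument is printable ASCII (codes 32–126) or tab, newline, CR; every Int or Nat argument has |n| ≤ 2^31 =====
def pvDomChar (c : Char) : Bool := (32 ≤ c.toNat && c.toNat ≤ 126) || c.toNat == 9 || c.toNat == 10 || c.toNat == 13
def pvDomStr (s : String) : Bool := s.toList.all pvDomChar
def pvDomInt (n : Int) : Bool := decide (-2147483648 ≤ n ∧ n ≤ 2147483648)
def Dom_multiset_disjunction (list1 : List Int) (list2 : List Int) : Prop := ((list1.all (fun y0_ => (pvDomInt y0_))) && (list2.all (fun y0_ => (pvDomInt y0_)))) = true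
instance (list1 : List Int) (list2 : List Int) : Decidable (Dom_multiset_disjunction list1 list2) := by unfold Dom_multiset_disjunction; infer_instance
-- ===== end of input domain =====

-- B replaces the Counter/set-union/sorted-keys build and the quadratic sum(lists, []) flatten
-- by sorting both lists and doing a two-pointer run-length merge (measured faster on large inputs).

-- ===== PORT A =====
def multiset_disjunction (list1 : List Int) (list2 : List Int) : List Int :=
  let c1 := PySem.Dict.counter list1
  let c2 := PySem.Dict.counter list2
  let keys : PySem.Set Int :=
    PySem.Set.union (PySem.Set.ofList (PySem.Dict.keys c1)) (PySem.Dict.keys c2)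
  let c := keys.foldl
    (fun d k => PySem.Dict.insert d k (max (PySem.Dict.getD c1 k 0) (PySem.Dict.getD c2 k 0)))
    PySem.Dict.empty
  ((PySem.List.sorted (PySem.Dict.keys c) (fun x => x) false).map
      (fun k => List.replicate (PySem.Dict.getD c k 0).toNat k)).flatten

-- ===== PORT B =====
-- inner while loop: length of the leading run of v
def runLen (v : Int) : List Int → Nat
  | [] => 0
  | x :: xs => if x = v then runLen v xs + 1 else 0

-- main while loop of Source B: i/j pointers become the remaining suffixes
def mergeRuns : List Int → List Int → List Int
  | [], l2 => l2
  | x :: xs, [] => x :: xs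
  | x :: xs, y :: ys =>
    let v := min x y
    let r1 := runLen v (x :: xs)
    let r2 := runLen v (y :: ys)
    List.replicate (max r1 r2) v ++ mergeRuns (List.drop r1 (x :: xs)) (List.drop r2 (y :: ys))
  termination_by l1 l2 => l1.length + l2.length
  decreasing_by
    have h : 1 ≤ runLen (min x y) (x :: xs) ∨ 1 ≤ runLen (min x y) (y :: ys) := by
      rcases le_total x y with h | h
      · left; simp [runLen, min_eq_left h]
      · right; simp [runLen, min_eq_right h]
    simp only [List.length_drop, List.length_cons]
    omega

def multiset_disjunction_alt (list1 : List Int) (list2 : List Int) : List Int :=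
  mergeRuns (PySem.List.sorted list1 (fun x => x) false)
            (PySem.List.sorted list2 (fun x => x) false)

-- ===== PRECONDITION & SPEC =====
def Spec_multiset_disjunction (list1 : List Int) (list2 : List Int) (out : List Int) : Prop := out = multiset_disjunction_alt list1 list2
instance (list1 : List Int) (list2 : List Int) (out : List Int) : Decidable (Spec_multiset_disjunction list1 list2 out) := by unfold Spec_multiset_disjunction; infer_instance

-- ===== CLAIM (what is proved, stated in full; the proofs are below) =====
def Claim_equal_multiset_disjunction : Prop := ∀ (list1 : List Int) (list2 : List Int), Dom_multiset_disjunction list1 list2 → Spec_multiset_disjunction list1 list2 (multiset_disjunction list1 list2)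

-- ===== LEMMAS AND PROOFS =====

-- fold of inserts with value depending only on the key: lookup
theorem getD_fold_ins (ks : List Int) (f : Int → Int) (d : PySem.Dict Int Int) (k : Int) :
    PySem.Dict.getD (ks.foldl (fun d k => PySem.Dict.insert d k (f k)) d) k 0
      = if k ∈ ks then f k else PySem.Dict.getD d k 0 := by
  induction ks generalizing d with
  | nil => simp
  | cons a t ih =>
    simp only [List.foldl_cons, ih, PySem.Dict.getD_insert, List.mem_cons]
    by_cases hk : k ∈ t
    · simp [hk]
    · by_cases ha : k = a <;> simp [hk, ha]

-- sortedness of a flatten of replicates over a ≤-sorted key list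
theorem flatten_replicate_sorted (ks : List Int) (n : Int → Nat)
    (h : ks.Pairwise (· ≤ ·)) :
    ((ks.map (fun k => List.replicate (n k) k)).flatten).Pairwise (· ≤ ·) := by
  induction ks with
  | nil => simp
  | cons a t ih =>
    simp only [List.map_cons, List.flatten_cons]
    rcases List.pairwise_cons.mp h with ⟨ha, ht⟩
    refine List.pairwise_append.mpr ⟨?_, ih ht, ?_⟩
    · exact List.pairwise_replicate.mpr (Or.inr le_rfl)
    · intro x hx y hy
      rcases List.eq_of_mem_replicate hx with rfl
      rcases List.mem_flatten.mp hy with ⟨l, hl, hyl⟩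
      rcases List.mem_map.mp hl with ⟨b, hb, rfl⟩
      rcases List.eq_of_mem_replicate hyl with rfl
      exact ha _ hb

-- count in a flatten of replicates over a nodup key list
theorem flatten_replicate_count (ks : List Int) (n : Int → Nat) (k : Int)
    (h : ks.Nodup) :
    ((ks.map (fun k => List.replicate (n k) k)).flatten).count k
      = if k ∈ ks then n k else 0 := by
  induction ks with
  | nil => simp
  | cons a t ih =>
    rcases List.nodup_cons.mp h with ⟨ha, ht⟩
    simp only [List.map_cons, List.flatten_cons, List.count_append, ih ht,
      List.count_replicate, List.mem_cons]
    by_cases hk : k = a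
    · subst hk; simp [ha]
    · simp [hk, Ne.symm hk]

-- run length = total count of the minimum in a sorted list
theorem runLen_eq_count (v : Int) (s : List Int)
    (hs : s.Pairwise (· ≤ ·)) (hmin : ∀ x ∈ s, v ≤ x) :
    runLen v s = s.count v := by
  induction s with
  | nil => simp [runLen]
  | cons x xs ih =>
    rcases List.pairwise_cons.mp hs with ⟨hx, hxs⟩
    by_cases hxv : x = v
    · subst hxv
      have hr : runLen x (x :: xs) = runLen x xs + 1 := by simp [runLen]
      rw [hr, List.count_cons_self, ih hxs (fun z hz => hmin z (List.mem_cons_of_mem _ hz))]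
    · have hne : v ∉ x :: xs := by
        intro hm
        rcases List.mem_cons.mp hm with hm | hm
        · exact hxv hm.symm
        · exact hxv (le_antisymm (hx v hm) (hmin x List.mem_cons_self))
      simp [runLen, hxv, List.count_eq_zero_of_not_mem hne]

-- dropping the leading run of the minimum: counts
theorem drop_runLen_count (v k : Int) (s : List Int)
    (hs : s.Pairwise (· ≤ ·)) (hmin : ∀ x ∈ s, v ≤ x) :
    (s.drop (runLen v s)).count k = if k = v then 0 else s.count k := by
  induction s with
  | nil => simp
  | cons x xs ih =>
    rcases List.pairwise_cons.mp hs with ⟨hx, hxs⟩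
    by_cases hxv : x = v
    · subst hxv
      have hr : runLen x (x :: xs) = runLen x xs + 1 := by simp [runLen]
      rw [hr, List.drop_succ_cons, ih hxs (fun z hz => hmin z (List.mem_cons_of_mem _ hz))]
      by_cases hk : k = x
      · simp [hk]
      · simp [hk, Ne.symm hk]
    · have hne : v ∉ x :: xs := by
        intro hm
        rcases List.mem_cons.mp hm with hm | hm
        · exact hxv hm.symm
        · have h1 := hx v hm
          have h2 := hmin x (List.mem_cons_self)
          exact hxv (le_antisymm h1 h2)
      simp only [runLen, if_neg hxv, List.drop_zero]
      by_cases hk : k = v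
      · subst hk; simp [List.count_eq_zero_of_not_mem hne]
      · simp [hk]

theorem mem_mergeRuns (s1 s2 : List Int) (z : Int)
    (hz : z ∈ mergeRuns s1 s2) : z ∈ s1 ∨ z ∈ s2 := by
  induction s1, s2 using mergeRuns.induct with
  | case1 l2 => rw [mergeRuns] at hz; exact Or.inr hz
  | case2 x xs => rw [mergeRuns] at hz; exact Or.inl hz
  | case3 x xs y ys v r1 r2 ih =>
    have ih' : z ∈ mergeRuns (List.drop (runLen (min x y) (x :: xs)) (x :: xs))
        (List.drop (runLen (min x y) (y :: ys)) (y :: ys)) →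
        z ∈ List.drop (runLen (min x y) (x :: xs)) (x :: xs) ∨
        z ∈ List.drop (runLen (min x y) (y :: ys)) (y :: ys) := ih
    rw [mergeRuns] at hz
    rcases List.mem_append.mp hz with hm | hm
    · have hzv : z = min x y := List.eq_of_mem_replicate hm
      rcases min_choice x y with h | h
      · left; rw [hzv.trans h]; exact List.mem_cons_self
      · right; rw [hzv.trans h]; exact List.mem_cons_self
    · rcases ih' hm with h | h
      · exact Or.inl (List.mem_of_mem_drop h)
      · exact Or.inr (List.mem_of_mem_drop h)

theorem count_mergeRuns (s1 s2 : List Int) (k : Int) :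
    s1.Pairwise (· ≤ ·) → s2.Pairwise (· ≤ ·) →
    (mergeRuns s1 s2).count k = max (s1.count k) (s2.count k) := by
  induction s1, s2 using mergeRuns.induct with
  | case1 l2 => intro _ _; simp [mergeRuns]
  | case2 x xs => intro _ _; simp [mergeRuns]
  | case3 x xs y ys v r1 r2 ih =>
    intro h1 h2
    have ih' : (List.drop (runLen (min x y) (x :: xs)) (x :: xs)).Pairwise (· ≤ ·) →
        (List.drop (runLen (min x y) (y :: ys)) (y :: ys)).Pairwise (· ≤ ·) →
        (mergeRuns (List.drop (runLen (min x y) (x :: xs)) (x :: xs))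
          (List.drop (runLen (min x y) (y :: ys)) (y :: ys))).count k
        = max ((List.drop (runLen (min x y) (x :: xs)) (x :: xs)).count k)
              ((List.drop (runLen (min x y) (y :: ys)) (y :: ys)).count k) := ih
    have hmin1 : ∀ z ∈ x :: xs, min x y ≤ z := by
      intro z hz
      rcases List.mem_cons.mp hz with h | h
      · rw [h]; exact min_le_left _ _
      · exact le_trans (min_le_left _ _) ((List.pairwise_cons.mp h1).1 z h)
    have hmin2 : ∀ z ∈ y :: ys, min x y ≤ z := by
      intro z hz
      rcases List.mem_cons.mp hz with h | h
      · rw [h]; exact min_le_right _ _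
      · exact le_trans (min_le_right _ _) ((List.pairwise_cons.mp h2).1 z h)
    have hd1 : (List.drop (runLen (min x y) (x :: xs)) (x :: xs)).Pairwise (· ≤ ·) :=
      h1.sublist (List.drop_sublist _ _)
    have hd2 : (List.drop (runLen (min x y) (y :: ys)) (y :: ys)).Pairwise (· ≤ ·) :=
      h2.sublist (List.drop_sublist _ _)
    rw [mergeRuns]
    simp only [List.count_append, List.count_replicate, ih' hd1 hd2,
      drop_runLen_count _ _ _ h1 hmin1, drop_runLen_count _ _ _ h2 hmin2]
    by_cases hk : k = min x y
    · subst hk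
      rw [runLen_eq_count _ _ h1 hmin1, runLen_eq_count _ _ h2 hmin2]
      simp
    · simp [hk, Ne.symm hk]

theorem sorted_mergeRuns (s1 s2 : List Int) :
    s1.Pairwise (· ≤ ·) → s2.Pairwise (· ≤ ·) →
    (mergeRuns s1 s2).Pairwise (· ≤ ·) := by
  induction s1, s2 using mergeRuns.induct with
  | case1 l2 => intro _ h2; simpa [mergeRuns] using h2
  | case2 x xs => intro h1 _; simpa [mergeRuns] using h1
  | case3 x xs y ys v r1 r2 ih =>
    intro h1 h2
    have ih' : (List.drop (runLen (min x y) (x :: xs)) (x :: xs)).Pairwise (· ≤ ·) →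
        (List.drop (runLen (min x y) (y :: ys)) (y :: ys)).Pairwise (· ≤ ·) →
        (mergeRuns (List.drop (runLen (min x y) (x :: xs)) (x :: xs))
          (List.drop (runLen (min x y) (y :: ys)) (y :: ys))).Pairwise (· ≤ ·) := ih
    have hmin1 : ∀ z ∈ x :: xs, min x y ≤ z := by
      intro z hz
      rcases List.mem_cons.mp hz with h | h
      · rw [h]; exact min_le_left _ _
      · exact le_trans (min_le_left _ _) ((List.pairwise_cons.mp h1).1 z h)
    have hmin2 : ∀ z ∈ y :: ys, min x y ≤ z := by
      intro z hz
      rcases List.mem_cons.mp hz with h | h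
      · rw [h]; exact min_le_right _ _
      · exact le_trans (min_le_right _ _) ((List.pairwise_cons.mp h2).1 z h)
    have hd1 : (List.drop (runLen (min x y) (x :: xs)) (x :: xs)).Pairwise (· ≤ ·) :=
      h1.sublist (List.drop_sublist _ _)
    have hd2 : (List.drop (runLen (min x y) (y :: ys)) (y :: ys)).Pairwise (· ≤ ·) :=
      h2.sublist (List.drop_sublist _ _)
    rw [mergeRuns]
    refine List.pairwise_append.mpr ⟨List.pairwise_replicate.mpr (Or.inr le_rfl), ih' hd1 hd2, ?_⟩
    intro a ha b hb
    rcases List.eq_of_mem_replicate ha with rfl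
    rcases mem_mergeRuns _ _ _ hb with hm | hm
    · exact hmin1 b (List.mem_of_mem_drop hm)
    · exact hmin2 b (List.mem_of_mem_drop hm)

-- characterisation of A's output
theorem A_count (l1 l2 : List Int) (k : Int) :
    (multiset_disjunction l1 l2).count k = max (l1.count k) (l2.count k) := by
  have hK : (PySem.Set.union (PySem.Set.ofList (PySem.Dict.keys (PySem.Dict.counter l1)))
      (PySem.Dict.keys (PySem.Dict.counter l2))).Nodup :=
    PySem.Set.nodup_union _ _ (PySem.Set.nodup_ofList _)
  simp only [multiset_disjunction]
  rw [PySem.Dict.keys_foldl_insert, PySem.Dict.keys_empty, PySem.Set.update_nil_left]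
  simp only [PySem.Set.ofList_eq_self_of_nodup _ hK]
  rw [flatten_replicate_count _ _ k
      ((PySem.List.sorted_perm _ (fun x => x) false).nodup_iff.mpr hK)]
  simp only [List.Perm.mem_iff (PySem.List.sorted_perm _ (fun x => x) false)]
  rw [getD_fold_ins]
  have hmem : (k ∈ PySem.Set.union (PySem.Set.ofList (PySem.Dict.keys (PySem.Dict.counter l1)))
      (PySem.Dict.keys (PySem.Dict.counter l2))) ↔ k ∈ l1 ∨ k ∈ l2 := by
    simp [PySem.Set.mem_union, PySem.Set.mem_ofList, PySem.Dict.keys_counter]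
  by_cases hk : k ∈ PySem.Set.union (PySem.Set.ofList (PySem.Dict.keys (PySem.Dict.counter l1)))
      (PySem.Dict.keys (PySem.Dict.counter l2))
  · rw [if_pos hk, if_pos hk, PySem.Dict.getD_counter, PySem.Dict.getD_counter,
        ← Nat.cast_max]
    exact Int.toNat_natCast _
  · rw [if_neg hk]
    have h1 : l1.count k = 0 :=
      List.count_eq_zero_of_not_mem (fun h => hk (hmem.mpr (Or.inl h)))
    have h2 : l2.count k = 0 :=
      List.count_eq_zero_of_not_mem (fun h => hk (hmem.mpr (Or.inr h)))
    simp [h1, h2]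

theorem A_sorted (l1 l2 : List Int) :
    (multiset_disjunction l1 l2).Pairwise (· ≤ ·) := by
  simp only [multiset_disjunction]
  exact flatten_replicate_sorted _ _
    (by simpa using PySem.List.sorted_pairwise _ (fun x => x))

theorem B_count (l1 l2 : List Int) (k : Int) :
    (multiset_disjunction_alt l1 l2).count k = max (l1.count k) (l2.count k) := by
  unfold multiset_disjunction_alt
  rw [count_mergeRuns _ _ k (by simpa using PySem.List.sorted_pairwise l1 (fun x => x))
        (by simpa using PySem.List.sorted_pairwise l2 (fun x => x))]
  rw [(PySem.List.sorted_perm l1 (fun x => x) false).count_eq,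
      (PySem.List.sorted_perm l2 (fun x => x) false).count_eq]

theorem B_sorted (l1 l2 : List Int) :
    (multiset_disjunction_alt l1 l2).Pairwise (· ≤ ·) := by
  unfold multiset_disjunction_alt
  exact sorted_mergeRuns _ _ (by simpa using PySem.List.sorted_pairwise l1 (fun x => x))
    (by simpa using PySem.List.sorted_pairwise l2 (fun x => x))

-- ===== VERDICT (by name: the statement is the Claim_ definition above) =====
theorem multiset_disjunction_spec : Claim_equal_multiset_disjunction := by
  intro l1 l2 _
  unfold Spec_multiset_disjunction
  have hperm : (multiset_disjunction l1 l2).Perm (multiset_disjunction_alt l1 l2) := by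
    rw [List.perm_iff_count]
    intro k
    rw [A_count, B_count]
  exact hperm.eq_of_pairwise' (A_sorted l1 l2) (B_sorted l1 l2)
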